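-- pv_equiv track=rewrite | github.com/posl/comment_recommendation | script/mod_gen/2_time/zh/136_C/6.py | odd_number
-- ===== SOURCE A (Python) =====
-- def odd_number(n):
--     count = 0
--     for i in range(1,n+1):
--         if i < 10:
--             if i % 2 == 1:
--                 count += 1
--         elif i < 100:
--             if i % 2 == 1:
--                 count += 1
--         elif i < 1000:
--             if i % 2 == 1:
--                 count += 2
--         elif i < 10000:
--             if i % 2 == 1:
--                 count += 2
--         elif i < 100000:
--             if i % 2 == 1:
--                 count += 3
--         elif i < 1000000:
--             if i % 2 == 1:
--                 count += 3
--         elif i < 10000000: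
--             if i % 2 == 1:
--                 count += 4
--         elif i < 100000000:
--             if i % 2 == 1:
--                 count += 4
--         elif i < 1000000000:
--             if i % 2 == 1:
--                 count += 5
--         elif i < 10000000000:
--             if i % 2 == 1:
--                 count += 5
--     return count
-- ===== SOURCE B (Python) =====
-- def odd_number(n):
--     # Closed-form per power-of-ten bucket: count odds in each bucket (clamped to n)
--     # times that bucket's weight, O(log n) instead of O(n).
--     def odds_upto(m):
--         return (m + 1) // 2 if m > 0 else 0
--     total = 0
--     lo = 1
--     for k in range(1, 11):
--         hi = lo * 10
--         w = (k + 1) // 2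
--         top = min(n, hi - 1)
--         if top >= lo:
--             total += w * (odds_upto(top) - odds_upto(lo - 1))
--         lo = hi
--     return total
-- ===== Notes on version B (the rewrite author's own statement) =====
-- stated objective: faster
-- what changed: Replaces A's per-integer loop up to n with a closed-form count: for each of the five weight buckets (consecutive pairs of decimal-digit lengths) it multiplies the weight by the arithmetically computed number of odd integers in the bucket clamped at n.
import Mathlib
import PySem

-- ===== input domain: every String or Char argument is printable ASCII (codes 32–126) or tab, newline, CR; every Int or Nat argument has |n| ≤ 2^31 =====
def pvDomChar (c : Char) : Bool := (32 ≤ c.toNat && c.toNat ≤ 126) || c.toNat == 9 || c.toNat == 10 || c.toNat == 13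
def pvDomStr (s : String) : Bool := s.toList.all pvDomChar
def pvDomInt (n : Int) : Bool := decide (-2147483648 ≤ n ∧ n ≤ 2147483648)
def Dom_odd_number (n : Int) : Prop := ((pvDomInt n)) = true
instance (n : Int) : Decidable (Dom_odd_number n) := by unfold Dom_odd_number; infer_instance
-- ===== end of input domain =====

-- B replaces A's O(n) scan by a closed-form count of odd numbers per power-of-ten
-- weight bucket (clamped at n); objective: faster (asymptotic).

-- ===== PORT A =====
-- loop body of A's `for i in range(1, n+1)` (the elif chain, step for step)
def aStep (count i : Int) : Int :=
  if i < 10 then (if PySem.Int.mod i 2 = 1 then count + 1 else count)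
  else if i < 100 then (if PySem.Int.mod i 2 = 1 then count + 1 else count)
  else if i < 1000 then (if PySem.Int.mod i 2 = 1 then count + 2 else count)
  else if i < 10000 then (if PySem.Int.mod i 2 = 1 then count + 2 else count)
  else if i < 100000 then (if PySem.Int.mod i 2 = 1 then count + 3 else count)
  else if i < 1000000 then (if PySem.Int.mod i 2 = 1 then count + 3 else count)
  else if i < 10000000 then (if PySem.Int.mod i 2 = 1 then count + 4 else count)
  else if i < 100000000 then (if PySem.Int.mod i 2 = 1 then count + 4 else count)
  else if i < 1000000000 then (if PySem.Int.mod i 2 = 1 then count + 5 else count)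
  else if i < 10000000000 then (if PySem.Int.mod i 2 = 1 then count + 5 else count)
  else count

def odd_number (n : Int) : Int :=
  (PySem.List.pyRange 1 (n + 1) 1).foldl aStep 0

-- ===== PORT B =====
-- B's helper odds_upto(m) = number of odd integers in [1, m]
def oddsUpto (m : Int) : Int :=
  if 0 < m then PySem.Int.floordiv (m + 1) 2 else 0

def odd_number_alt (n : Int) : Int :=
  ((PySem.List.pyRange 1 6 1).foldl
    (fun (st : Int × Int) w =>
      let total := st.1
      let lo := st.2
      let hi := lo * 100
      let top := min n (hi - 1)
      let total := if top ≥ lo then total + w * (oddsUpto top - oddsUpto (lo - 1)) else total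
      (total, hi))
    (0, 1)).1

-- ===== PRECONDITION & SPEC =====
def Spec_odd_number (n : Int) (out : Int) : Prop := out = odd_number_alt n
instance (n : Int) (out : Int) : Decidable (Spec_odd_number n out) := by unfold Spec_odd_number; infer_instance

-- ===== CLAIM (what is proved, stated in full; the proofs are below) =====
def Claim_equal_odd_number : Prop := ∀ (n : Int), Dom_odd_number n → Spec_odd_number n (odd_number n)

-- ===== LEMMAS AND PROOFS =====

-- one weight bucket of B, as a standalone term
def tterm (lo hi w n : Int) : Int :=
  if min n (hi - 1) ≥ lo then w * (oddsUpto (min n (hi - 1)) - oddsUpto (lo - 1)) else 0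

-- indicator contribution of index i to bucket [lo, hi) with weight w
def indT (lo hi w i : Int) : Int := if lo ≤ i ∧ i < hi ∧ i % 2 = 1 then w else 0

def stepAdd (i : Int) : Int :=
  indT 1 100 1 i + indT 100 10000 2 i + indT 10000 1000000 3 i +
    indT 1000000 100000000 4 i + indT 100000000 10000000000 5 i

lemma pyRange16 : PySem.List.pyRange 1 6 1 = [1, 2, 3, 4, 5] := by decide

lemma alt_as_tterms (n : Int) :
    odd_number_alt n =
      tterm 1 100 1 n + tterm 100 10000 2 n + tterm 10000 1000000 3 n +
        tterm 1000000 100000000 4 n + tterm 100000000 10000000000 5 n := by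
  simp only [odd_number_alt, pyRange16, List.foldl, tterm]
  norm_num
  split_ifs <;> ring

lemma oddsUpto_eq (m : Int) : oddsUpto m = if 0 < m then (m + 1) / 2 else 0 := by
  simp only [oddsUpto, PySem.Int.floordiv_eq_ediv_of_pos (show (0:Int) < 2 by norm_num)]

lemma oddsUpto_succ_odd (m : Int) (hm : 0 ≤ m) (hp : (m + 1) % 2 = 1) :
    oddsUpto (m + 1) = oddsUpto m + 1 := by
  simp only [oddsUpto_eq]; split_ifs <;> omega

lemma oddsUpto_succ_even (m : Int) (hm : 0 ≤ m) (hp : ¬ (m + 1) % 2 = 1) :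
    oddsUpto (m + 1) = oddsUpto m := by
  simp only [oddsUpto_eq]; split_ifs <;> omega

lemma tterm_step (lo hi w m : Int) (_hlo : 0 < lo) (hhi : lo < hi) (hm : 0 ≤ m) :
    tterm lo hi w (m + 1) = tterm lo hi w m + indT lo hi w (m + 1) := by
  simp only [tterm, indT]
  rcases (by omega : m + 1 < lo ∨ lo ≤ m + 1) with h1 | h1
  · rw [if_neg (by omega), if_neg (by omega),
      if_neg (show ¬ (lo ≤ m + 1 ∧ m + 1 < hi ∧ (m + 1) % 2 = 1) by omega)]
    ring
  · rcases (by omega : m + 1 < hi ∨ hi ≤ m + 1) with h2 | h2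
    · have e1 : min (m + 1) (hi - 1) = m + 1 := by omega
      have e2 : min m (hi - 1) = m := by omega
      rw [e1, e2, if_pos (show m + 1 ≥ lo from h1)]
      rcases (by omega : m < lo ∨ lo ≤ m) with h3 | h3
      · have hm1 : lo - 1 = m := by omega
        rw [if_neg (show ¬ m ≥ lo by omega), hm1]
        by_cases hp : (m + 1) % 2 = 1
        · rw [if_pos (show lo ≤ m + 1 ∧ m + 1 < hi ∧ (m + 1) % 2 = 1 from ⟨h1, h2, hp⟩),
            oddsUpto_succ_odd m hm hp]
          ring
        · rw [if_neg (show ¬ (lo ≤ m + 1 ∧ m + 1 < hi ∧ (m + 1) % 2 = 1) from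
              fun hc => hp hc.2.2), oddsUpto_succ_even m hm hp]
          ring
      · rw [if_pos (show m ≥ lo from h3)]
        by_cases hp : (m + 1) % 2 = 1
        · rw [if_pos (show lo ≤ m + 1 ∧ m + 1 < hi ∧ (m + 1) % 2 = 1 from ⟨h1, h2, hp⟩),
            oddsUpto_succ_odd m hm hp]
          ring
        · rw [if_neg (show ¬ (lo ≤ m + 1 ∧ m + 1 < hi ∧ (m + 1) % 2 = 1) from
              fun hc => hp hc.2.2), oddsUpto_succ_even m hm hp]
          ring
    · have e1 : min (m + 1) (hi - 1) = hi - 1 := by omega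
      have e2 : min m (hi - 1) = hi - 1 := by omega
      rw [e1, e2, if_neg (show ¬ (lo ≤ m + 1 ∧ m + 1 < hi ∧ (m + 1) % 2 = 1) by omega)]
      ring

lemma alt_succ (m : Int) (hm : 0 ≤ m) :
    odd_number_alt (m + 1) = odd_number_alt m + stepAdd (m + 1) := by
  rw [alt_as_tterms, alt_as_tterms,
    tterm_step 1 100 1 m (by norm_num) (by norm_num) hm,
    tterm_step 100 10000 2 m (by norm_num) (by norm_num) hm,
    tterm_step 10000 1000000 3 m (by norm_num) (by norm_num) hm,
    tterm_step 1000000 100000000 4 m (by norm_num) (by norm_num) hm,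
    tterm_step 100000000 10000000000 5 m (by norm_num) (by norm_num) hm,
    stepAdd]
  ring

set_option maxHeartbeats 2000000 in
lemma aStep_eq_stepAdd (c i : Int) (h : 1 ≤ i) : aStep c i = c + stepAdd i := by
  have hmod : PySem.Int.mod i 2 = i % 2 :=
    PySem.Int.mod_eq_emod_of_pos (by norm_num)
  simp only [aStep, stepAdd, indT, hmod]
  by_cases hp : i % 2 = 1
  · simp only [hp, and_true]
    split_ifs <;> omega
  · have hz : ∀ lo hi w : Int, (if lo ≤ i ∧ i < hi ∧ i % 2 = 1 then w else 0) = 0 :=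
      fun lo hi w => if_neg (fun hc => hp hc.2.2)
    simp only [hz, if_neg hp]
    split_ifs <;> ring

lemma a_succ (m : Int) (hm : 0 ≤ m) :
    odd_number (m + 1) = aStep (odd_number m) (m + 1) := by
  unfold odd_number
  rw [PySem.List.pyRange_one_succ_right (by omega), List.foldl_append]
  rfl

lemma alt_nonpos (n : Int) (h : n ≤ 0) : odd_number_alt n = 0 := by
  rw [alt_as_tterms]
  simp only [tterm]
  rw [if_neg (by omega), if_neg (by omega), if_neg (by omega),
    if_neg (by omega), if_neg (by omega)]
  ring

lemma eq_on_nat (k : Nat) : odd_number (k : Int) = odd_number_alt (k : Int) := by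
  induction k with
  | zero => decide
  | succ m ih =>
    have hc : ((m + 1 : Nat) : Int) = (m : Int) + 1 := by push_cast; ring
    rw [hc, a_succ (m : Int) (by positivity),
      aStep_eq_stepAdd _ _ (by omega), ih, ← alt_succ (m : Int) (by positivity)]

-- ===== VERDICT (by name: the statement is the Claim_ definition above) =====
theorem odd_number_spec : Claim_equal_odd_number := by
  intro n _
  unfold Spec_odd_number
  rcases (by omega : n ≤ 0 ∨ 0 < n) with h | h
  · rw [alt_nonpos n h]
    unfold odd_number
    rw [PySem.List.pyRange_one_eq_nil (by omega)]
    rfl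
  · have : n = (n.toNat : Int) := by omega
    rw [this, eq_on_nat]
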